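-- pv_equiv track=rewrite | github.com/oceanbreak/RFD-Implementation | LearnDescriptor.py | calcOnesZeros
-- ===== SOURCE A (Python) =====
-- def calcOnesZeros(input_array, fpg):
--     """
--     Function calculates 1s and 0s responses in one group
--     input array - array of Trues and Falses that are responses of RFD
--     fpg - array of First Patches in Group index
--     """
--     ones_zeros = []
--     for i in range(len(fpg)-1):
--         ones = 0
--         zeros = 0
--         for j in range(fpg[i], fpg[i+1]):
--             if input_array[j]: ones += 1
--             else: zeros += 1
--         ones_zeros.append( (ones, zeros) )
--     return tuple(ones_zeros)
-- ===== SOURCE B (Python) =====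
-- def calcOnesZeros(input_array, fpg):
--     """
--     Function calculates 1s and 0s responses in one group
--     input array - array of Trues and Falses that are responses of RFD
--     fpg - array of First Patches in Group index
--     """
--     prefix = [0]
--     total = 0
--     for x in input_array:
--         if x:
--             total += 1
--         prefix.append(total)
--     result = []
--     for a, b in zip(fpg, fpg[1:]):
--         if a < b:
--             ones = prefix[b] - prefix[a]
--             result.append((ones, (b - a) - ones))
--         else:
--             result.append((0, 0))
--     return tuple(result)
-- ===== Notes on version B (the rewrite author's own statement) =====
-- stated objective: alternative
-- what changed: B builds a prefix-sum table of True counts in one pass and answers each group by a subtraction, instead of re-scanning every segment element by element.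
-- outside the precondition, e.g. on calcOnesZeros([True, False], [-1, 1]): A returns ((1, 1),), B returns ((0, 2),)
import Mathlib
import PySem

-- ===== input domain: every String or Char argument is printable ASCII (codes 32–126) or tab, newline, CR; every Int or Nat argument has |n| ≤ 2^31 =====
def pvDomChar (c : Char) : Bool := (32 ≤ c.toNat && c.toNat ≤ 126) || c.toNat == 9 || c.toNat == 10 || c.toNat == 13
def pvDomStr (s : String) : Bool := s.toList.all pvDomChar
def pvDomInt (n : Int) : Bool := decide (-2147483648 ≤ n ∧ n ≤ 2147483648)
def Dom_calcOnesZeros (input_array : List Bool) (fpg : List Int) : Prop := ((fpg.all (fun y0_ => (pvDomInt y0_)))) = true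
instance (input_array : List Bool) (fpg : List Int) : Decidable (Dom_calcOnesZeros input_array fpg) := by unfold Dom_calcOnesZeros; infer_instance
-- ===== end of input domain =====

-- B replaces A's per-group rescan with a one-pass prefix-sum table queried by subtraction per group.

-- ===== PORT A =====
def calcOnesZeros (input_array : List Bool) (fpg : List Int) : List (Int × Int) :=
  (PySem.List.pyRange 0 ((fpg.length : Int) - 1) 1).foldl (fun acc i =>
    let a := PySem.List.pyGetD fpg i 0
    let b := PySem.List.pyGetD fpg (i + 1) 0
    let oz := (PySem.List.pyRange a b 1).foldl (fun (oz : Int × Int) j =>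
        if PySem.List.pyGetD input_array j false then (oz.1 + 1, oz.2) else (oz.1, oz.2 + 1))
      ((0 : Int), (0 : Int))
    acc ++ [oz]) []

-- ===== PORT B =====
def calcOnesZeros_alt (input_array : List Bool) (fpg : List Int) : List (Int × Int) :=
  let st := input_array.foldl (fun (s : List Int × Int) x =>
      let t := if x then s.2 + 1 else s.2
      (s.1 ++ [t], t)) ([(0 : Int)], (0 : Int))
  let pre := st.1
  (fpg.zip (fpg.drop 1)).foldl (fun acc (ab : Int × Int) =>
    if ab.1 < ab.2 then
      let ones := PySem.List.pyGetD pre ab.2 0 - PySem.List.pyGetD pre ab.1 0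
      acc ++ [(ones, (ab.2 - ab.1) - ones)]
    else acc ++ [((0 : Int), (0 : Int))]) []

-- ===== PRECONDITION & SPEC =====
-- Pre_ restricts every non-empty group range [fpg[i], fpg[i+1]) to actual positions 0..len(input_array):
-- negative boundaries are outside the natural domain of patch indices (A silently wraps around via Python
-- negative indexing there), and past-the-end boundaries make A raise IndexError.
def Pre_calcOnesZeros (input_array : List Bool) (fpg : List Int) : Prop :=
  ∀ p ∈ fpg.zip (fpg.drop 1), p.1 < p.2 → 0 ≤ p.1 ∧ p.2 ≤ (input_array.length : Int)
instance (input_array : List Bool) (fpg : List Int) : Decidable (Pre_calcOnesZeros input_array fpg) := by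
  unfold Pre_calcOnesZeros; infer_instance

def pvWitness_calcOnesZeros : List Bool × List Int := ([true, false, true], [0, 2, 3])

def Spec_calcOnesZeros (input_array : List Bool) (fpg : List Int) (out : List (Int × Int)) : Prop := out = calcOnesZeros_alt input_array fpg
instance (input_array : List Bool) (fpg : List Int) (out : List (Int × Int)) : Decidable (Spec_calcOnesZeros input_array fpg out) := by unfold Spec_calcOnesZeros; infer_instance

-- ===== CLAIM (what is proved, stated in full; the proofs are below) =====
def Claim_equal_calcOnesZeros : Prop := ∀ (input_array : List Bool) (fpg : List Int), Dom_calcOnesZeros input_array fpg → Pre_calcOnesZeros input_array fpg → Spec_calcOnesZeros input_array fpg (calcOnesZeros input_array fpg)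

-- ===== LEMMAS AND PROOFS =====

-- number of Trues, as an Int
def cntT (l : List Bool) : Int := (l.count true : Int)

-- the prefix-table fold of B, characterised
lemma prefix_build (l : List Bool) (P0 : List Int) (t0 : Int) :
    l.foldl (fun (s : List Int × Int) x =>
      (s.1 ++ [if x then s.2 + 1 else s.2], if x then s.2 + 1 else s.2)) (P0, t0)
    = (P0 ++ (List.range l.length).map (fun k => t0 + cntT (l.take (k + 1))), t0 + cntT l) := by
  induction l generalizing P0 t0 with
  | nil => simp [cntT]
  | cons x xs ih =>
    simp only [List.foldl_cons, ih]
    have hx : ∀ l, t0 + cntT (x :: l) = (if x = true then t0 + 1 else t0) + cntT l := by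
      intro l; simp only [cntT, List.count_cons]; cases x <;> simp <;> ring
    simp only [List.length_cons, List.range_succ_eq_map, List.map_cons, List.map_map,
      List.take_succ_cons, List.append_assoc, List.singleton_append, Prod.mk.injEq,
      List.take_zero, hx]
    simp [cntT, Function.comp_def]

lemma cntT_take_succ (ia : List Bool) (k : Nat) (hk : k < ia.length) :
    cntT (ia.take (k + 1)) = cntT (ia.take k) + (if ia[k] then 1 else 0) := by
  rw [List.take_add_one, List.getElem?_eq_getElem hk]
  cases h2 : ia[k] <;> simp [cntT, List.count_append]

-- B's prefix lookup = count of Trues in the first k elements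
lemma prefix_get (ia : List Bool) (k : Nat) (hk : k ≤ ia.length) :
    PySem.List.pyGetD ((ia.foldl (fun (s : List Int × Int) x =>
      (s.1 ++ [if x then s.2 + 1 else s.2], if x then s.2 + 1 else s.2)) ([(0 : Int)], (0 : Int))).1) (k : Int) 0 = cntT (ia.take k) := by
  rw [prefix_build]
  rw [PySem.List.pyGetD_natCast]
  cases k with
  | zero => simp [cntT]
  | succ k' =>
    simp only [List.cons_append, List.nil_append, List.getD, List.getElem?_cons_succ]
    rw [List.getElem?_map, List.getElem?_range (by omega)]
    simp

-- A's inner scan over [a', a'+m) in terms of prefix counts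
lemma inner_scan (ia : List Bool) (m a' : Nat) (o z : Int) (h : a' + m ≤ ia.length) :
    (PySem.List.pyRange (a' : Int) ((a' : Int) + (m : Int)) 1).foldl
      (fun (oz : Int × Int) j =>
        if PySem.List.pyGetD ia j false then (oz.1 + 1, oz.2) else (oz.1, oz.2 + 1)) (o, z)
    = (o + (cntT (ia.take (a' + m)) - cntT (ia.take a')),
       z + (m : Int) - (cntT (ia.take (a' + m)) - cntT (ia.take a'))) := by
  induction m generalizing o z with
  | zero => simp
  | succ m' ih =>
    have hle : (a' : Int) ≤ (a' : Int) + (m' : Int) := by omega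
    have : ((a' : Int) + ((m' : Nat) + 1 : Nat)) = ((a' : Int) + (m' : Int)) + 1 := by push_cast; ring
    rw [this, PySem.List.pyRange_one_succ_right hle, List.foldl_append, ih o z (by omega)]
    have hidx : (a' : Int) + (m' : Int) = ((a' + m' : Nat) : Int) := by push_cast; ring
    rw [List.foldl_cons, List.foldl_nil, hidx, PySem.List.pyGetD_natCast]
    have hlt : a' + m' < ia.length := by omega
    rw [List.getD_eq_getElem _ _ hlt]
    have hadd : a' + (m' + 1) = (a' + m') + 1 := by omega
    rw [hadd, cntT_take_succ ia (a' + m') hlt]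
    cases h2 : ia[a' + m'] <;> simp [Prod.ext_iff]
    all_goals first | (constructor <;> ring) | ring

-- B's outer loop, where both branches append one element
lemma foldl_append_ite {α β : Type} (c : α → Prop) [DecidablePred c] (f g : α → β)
    (l : List α) (acc : List β) :
    l.foldl (fun acc x => if c x then acc ++ [f x] else acc ++ [g x]) acc
      = acc ++ l.map (fun x => if c x then f x else g x) := by
  induction l generalizing acc with
  | nil => simp
  | cons x xs ih => by_cases h : c x <;> simp [h, ih]

theorem calcOnesZeros_spec : Claim_equal_calcOnesZeros := by
  intro ia fpg _hdom hpre
  unfold Spec_calcOnesZeros calcOnesZeros calcOnesZeros_alt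
  rw [PySem.List.foldl_append_singleton_eq_map, foldl_append_ite]
  simp only [List.nil_append]
  apply List.ext_getElem
  · simp [PySem.List.length_pyRange_one]
  · intro k hk1 hk2
    rw [List.getElem_map, List.getElem_map, List.getElem_zip]
    have hkL : k + 1 < fpg.length := by
      have := hk2; simp at this; omega
    have hidx : (PySem.List.pyRange 0 ((fpg.length : Int) - 1) 1)[k]'(by simpa using hk1) = (k : Int) := by
      rw [PySem.List.getElem_pyRange_one]; ring
    rw [hidx]
    have hg1 : PySem.List.pyGetD fpg (k : Int) 0 = fpg[k]'(by omega) := by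
      rw [PySem.List.pyGetD_natCast, List.getD_eq_getElem _ _ (by omega)]
    have hcast : ((k : Int) + 1) = ((k + 1 : Nat) : Int) := by push_cast; ring
    have hg2 : PySem.List.pyGetD fpg ((k : Int) + 1) 0 = fpg[k + 1]'hkL := by
      rw [hcast, PySem.List.pyGetD_natCast, List.getD_eq_getElem _ _ hkL]
    rw [hg1, hg2]
    have hdropk : (fpg.drop 1)[k]'(by simp; omega) = fpg[k + 1]'hkL := by
      rw [List.getElem_drop]
      congr 1
      omega
    rw [hdropk]
    have hmem : (fpg[k]'(by omega), fpg[k + 1]'hkL) ∈ fpg.zip (fpg.drop 1) := by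
      have hzl : k < (fpg.zip (fpg.drop 1)).length := by simp; omega
      have := List.getElem_mem hzl
      rwa [List.getElem_zip, hdropk] at this
    by_cases hab : fpg[k]'(by omega) < fpg[k + 1]'hkL
    · obtain ⟨ha, hb⟩ := hpre _ hmem hab
      have hA : fpg[k]'(by omega) = ((fpg[k]'(by omega)).toNat : Int) := by omega
      have hB : fpg[k + 1]'hkL = ((fpg[k + 1]'hkL).toNat : Int) := by omega
      have hscan := inner_scan ia ((fpg[k + 1]'hkL).toNat - (fpg[k]'(by omega)).toNat)
        ((fpg[k]'(by omega)).toNat) 0 0 (by omega)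
      have harg : (((fpg[k]'(by omega)).toNat : Nat) : Int)
          + (((fpg[k + 1]'hkL).toNat - (fpg[k]'(by omega)).toNat : Nat) : Int) = fpg[k + 1]'hkL := by
        omega
      rw [harg] at hscan
      rw [if_pos hab, hA, hscan, hB]
      simp only [Int.toNat_natCast]
      rw [prefix_get ia _ (by omega), prefix_get ia _ (by omega)]
      have htot : (fpg[k]'(by omega)).toNat + ((fpg[k + 1]'hkL).toNat - (fpg[k]'(by omega)).toNat)
          = (fpg[k + 1]'hkL).toNat := by omega
      rw [htot]
      simp only [Prod.mk.injEq]
      constructor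
      · ring
      · push_cast [Nat.cast_sub (by omega : (fpg[k]'(by omega)).toNat ≤ (fpg[k + 1]'hkL).toNat)]
        ring
    · rw [PySem.List.pyRange_one_eq_nil (by omega : fpg[k + 1]'hkL ≤ fpg[k]'(by omega)), if_neg hab]
      simp
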